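-- pv_equiv track=rewrite | github.com/Ilyshashved/- | Amplitude_functions.py | array_amplitudes
-- ===== SOURCE A (Python) =====
-- def array_amplitudes (array, segment_size) : # Определение массива амплитуд всего сигнала, seg_size определяет кол-во индексов
--     amplitudes = []  # Массив для хранения амплитуд
--     # Проходим по массиву с шагом segment_size
--     for i in range(0, len(array), segment_size):
--         # Определяем сегмент массива
--         segment = array[i:i + segment_size]
--
--         max_value = max(segment)
--         min_value = min(segment)
--         amplitude = max_value - min_value
--         amplitudes.append(amplitude)  # Добавляем амплитуду в массив
--     return amplitudes
-- ===== SOURCE B (Python) =====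
-- def array_amplitudes(array, segment_size):
--     # Single streaming pass: running min/max of the current segment, flushed
--     # every segment_size elements; no slicing, no per-segment max()/min() scans.
--     if segment_size <= 0:
--         return []
--     amplitudes = []
--     cnt = 0
--     mn = 0
--     mx = 0
--     for x in array:
--         if cnt == 0:
--             mn = x
--             mx = x
--         else:
--             if x < mn:
--                 mn = x
--             if x > mx:
--                 mx = x
--         cnt += 1
--         if cnt == segment_size:
--             amplitudes.append(mx - mn)
--             cnt = 0
--     if cnt > 0:
--         amplitudes.append(mx - mn)
--     return amplitudes
-- ===== Notes on version B (the rewrite author's own statement) =====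
-- stated objective: alternative
-- what changed: Replaced the index-range loop that slices out each segment and calls max()/min() on it with a single streaming pass keeping a counter and running min/max of the current segment, flushing an amplitude every segment_size elements (and once more for a trailing partial segment).
import Mathlib
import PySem

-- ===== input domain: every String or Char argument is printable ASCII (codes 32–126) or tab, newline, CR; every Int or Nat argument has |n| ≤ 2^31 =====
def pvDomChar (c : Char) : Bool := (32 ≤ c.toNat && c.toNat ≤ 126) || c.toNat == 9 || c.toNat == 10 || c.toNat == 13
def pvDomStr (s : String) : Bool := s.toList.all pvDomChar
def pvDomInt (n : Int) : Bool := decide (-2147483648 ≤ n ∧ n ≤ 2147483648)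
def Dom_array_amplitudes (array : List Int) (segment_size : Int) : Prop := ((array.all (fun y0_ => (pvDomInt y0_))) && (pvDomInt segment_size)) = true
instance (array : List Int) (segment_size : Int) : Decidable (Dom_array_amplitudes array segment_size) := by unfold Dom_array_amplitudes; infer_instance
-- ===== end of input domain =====

-- B replaces A's range-and-slice loop (max()/min() per slice) by one streaming pass with a
-- counter and running min/max per segment; same values everywhere A returns (objective: alternative).


-- ===== PORT A =====
-- max(segment) - min(segment); Python raises ValueError on an empty segment — unreachable
-- under Pre_ (every slice taken at a range(0, len, step ≥ 1) index is nonempty), 0 is a dummy.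
def pyAmp (seg : List Int) : Int :=
  match PySem.List.max? seg (fun y => y), PySem.List.min? seg (fun y => y) with
  | some mx, some mn => mx - mn
  | _, _ => 0

def array_amplitudes (array : List Int) (segment_size : Int) : List Int :=
  (PySem.List.pyRange 0 (array.length : Int) segment_size).foldl
    (fun amplitudes i =>
      amplitudes ++ [pyAmp (PySem.List.slice array (some i) (some (i + segment_size)))]) []

-- ===== PORT B =====
-- B's for-loop over the elements, state (cnt, mn, mx, amplitudes); after the loop the
-- trailing partial segment is flushed iff cnt > 0.
def streamLoop (k : Int) : List Int → Int → Int → Int → List Int → List Int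
  | [], cnt, mn, mx, amplitudes =>
      if cnt > 0 then amplitudes ++ [mx - mn] else amplitudes
  | x :: xs, cnt, mn, mx, amplitudes =>
      let mn' := if cnt = 0 then x else (if x < mn then x else mn)
      let mx' := if cnt = 0 then x else (if x > mx then x else mx)
      let cnt' := cnt + 1
      if cnt' = k then streamLoop k xs 0 mn' mx' (amplitudes ++ [mx' - mn'])
      else streamLoop k xs cnt' mn' mx' amplitudes

def array_amplitudes_alt (array : List Int) (segment_size : Int) : List Int :=
  if segment_size ≤ 0 then []
  else streamLoop segment_size array 0 0 0 []

-- ===== PRECONDITION & SPEC =====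
-- Pre_ excludes only segment_size = 0, where Python A raises ValueError (range() with step 0).
def Pre_array_amplitudes (array : List Int) (segment_size : Int) : Prop := segment_size ≠ 0
instance (array : List Int) (segment_size : Int) : Decidable (Pre_array_amplitudes array segment_size) := by unfold Pre_array_amplitudes; infer_instance

def pvWitness_array_amplitudes : List Int × Int := ([1, 5, 2, 9, 3], 2)

def Spec_array_amplitudes (array : List Int) (segment_size : Int) (out : List Int) : Prop := out = array_amplitudes_alt array segment_size
instance (array : List Int) (segment_size : Int) (out : List Int) : Decidable (Spec_array_amplitudes array segment_size out) := by unfold Spec_array_amplitudes; infer_instance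

-- ===== CLAIM (what is proved, stated in full; the proofs are below) =====
def Claim_equal_array_amplitudes : Prop := ∀ (array : List Int) (segment_size : Int), Dom_array_amplitudes array segment_size → Pre_array_amplitudes array segment_size → Spec_array_amplitudes array segment_size (array_amplitudes array segment_size)

-- ===== LEMMAS AND PROOFS =====

-- Common reference point of the two ports: the amplitudes of the size-(K+1) chunks.
def ampsSpec (K : Nat) : List Int → List Int
  | [] => []
  | x :: xs =>
      ((xs.take K).foldl max x - (xs.take K).foldl min x) :: ampsSpec K (xs.drop K)
  termination_by l => l.length
  decreasing_by simp

theorem ampsSpec_nil (K : Nat) : ampsSpec K [] = [] := by unfold ampsSpec; rfl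

theorem ampsSpec_cons (K : Nat) (x : Int) (xs : List Int) :
    ampsSpec K (x :: xs)
      = ((xs.take K).foldl max x - (xs.take K).foldl min x) :: ampsSpec K (xs.drop K) := by
  conv_lhs => unfold ampsSpec

theorem pyAmp_cons (x : Int) (t : List Int) :
    pyAmp (x :: t) = t.foldl max x - t.foldl min x := by
  simp [pyAmp, PySem.List.max?_id_cons, PySem.List.min?_id_cons]

theorem pyRange_neg_nil (a b s : Int) (hs : s < 0) (hab : a ≤ b) :
    PySem.List.pyRange a b s = [] := by
  simp only [PySem.List.pyRange]
  rw [if_neg (by omega), if_neg (by omega), if_neg (by omega)]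
  simp

-- the mapped slice at range index j is the j-th chunk
theorem map_slice_chunks (K : Nat) (l : List Int) (c : Nat) :
    List.map (fun i => pyAmp (PySem.List.slice l (some i) (some (i + ((K : Int) + 1)))))
        (List.map (fun k : Nat => (0 : Int) + ((K : Int) + 1) * (k : Int)) (List.range c))
      = List.map (fun j => pyAmp ((l.drop ((K + 1) * j)).take (K + 1))) (List.range c) := by
  rw [List.map_map]
  apply List.map_congr_left
  intro j _
  simp only [Function.comp_apply]
  congr 1
  have e1 : (0 : Int) + ((K : Int) + 1) * (j : Int) = (((K + 1) * j : Nat) : Int) := by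
    push_cast; ring
  have e2 : (0 : Int) + ((K : Int) + 1) * (j : Int) + ((K : Int) + 1)
      = (((K + 1) * j : Nat) : Int) + ((K + 1 : Nat) : Int) := by push_cast; ring
  rw [e2, e1, PySem.List.slice_natCast_add]

-- A-side: the range/slice loop computes ampsSpec, for any step of the form K+1.
theorem a_eq_ampsSpec (K : Nat) : ∀ (array : List Int),
    array_amplitudes array ((K : Int) + 1) = ampsSpec K array := by
  intro array
  induction hn : array.length using Nat.strong_induction_on generalizing array with
  | _ n ih =>
  unfold array_amplitudes
  rw [PySem.List.foldl_append_singleton_eq_map, List.nil_append,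
    PySem.List.pyRange_of_pos 0 (array.length : Int) (by omega)]
  cases array with
  | nil => simp [ampsSpec_nil]
  | cons x xs =>
    rw [if_pos (by simp)]
    have hcount : (((x :: xs).length : Int) - 0 + ((K : Int) + 1) - 1) / ((K : Int) + 1)
        = (xs.length : Int) / ((K : Int) + 1) + 1 := by
      have e : ((x :: xs).length : Int) - 0 + ((K : Int) + 1) - 1
          = (xs.length : Int) + 1 * ((K : Int) + 1) := by simp; ring
      rw [e, Int.add_mul_ediv_right _ _ (by omega)]
    rw [hcount]
    have htn : ((xs.length : Int) / ((K : Int) + 1) + 1).toNat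
        = ((xs.length : Int) / ((K : Int) + 1)).toNat + 1 := by
      have h0 : 0 ≤ (xs.length : Int) / ((K : Int) + 1) :=
        Int.ediv_nonneg (by omega) (by omega)
      omega
    rw [htn, map_slice_chunks, List.range_succ_eq_map, List.map_cons, List.map_map]
    rw [ampsSpec_cons]
    congr 1
    · -- the first chunk
      simp [pyAmp_cons, List.take_succ_cons]
    · -- remaining chunks = A on the dropped list = ampsSpec on the dropped list
      have hshift : ∀ j ∈ List.range ((xs.length : Int) / ((K : Int) + 1)).toNat,
          ((fun j => pyAmp (((x :: xs).drop ((K + 1) * j)).take (K + 1))) ∘ Nat.succ) j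
            = (fun j => pyAmp (((xs.drop K).drop ((K + 1) * j)).take (K + 1))) j := by
        intro j _
        simp only [Function.comp_apply]
        congr 2
        have em : (K + 1) * Nat.succ j = (K + (K + 1) * j) + 1 := by
          rw [Nat.succ_eq_add_one]; ring
        rw [em, List.drop_succ_cons, List.drop_drop]
      rw [List.map_congr_left hshift]
      by_cases hx : K < xs.length
      · -- the dropped list is nonempty: rebuild A on it and use the IH
        have hA' : array_amplitudes (xs.drop K) ((K : Int) + 1)
            = List.map (fun j => pyAmp (((xs.drop K).drop ((K + 1) * j)).take (K + 1)))
                (List.range ((xs.length : Int) / ((K : Int) + 1)).toNat) := by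
          unfold array_amplitudes
          rw [PySem.List.foldl_append_singleton_eq_map, List.nil_append,
            PySem.List.pyRange_of_pos 0 ((xs.drop K).length : Int) (by omega)]
          rw [if_pos (by simp only [List.length_drop]; omega)]
          have hdl : ((xs.drop K).length : Int) = (xs.length : Int) - (K : Int) := by
            simp [List.length_drop]; omega
          have hc2 : (((xs.drop K).length : Int) - 0 + ((K : Int) + 1) - 1) / ((K : Int) + 1)
              = (xs.length : Int) / ((K : Int) + 1) := by
            rw [hdl]
            congr 1
            ring
          rw [hc2, map_slice_chunks]
        rw [← hA']
        exact ih (xs.drop K).length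
          (by simp only [List.length_drop, List.length_cons] at hn ⊢; omega) (xs.drop K) rfl
      · -- the dropped list is empty: both sides vanish
        have hde : xs.drop K = [] := List.drop_eq_nil_of_le (by omega)
        have hc0 : (xs.length : Int) / ((K : Int) + 1) = 0 :=
          Int.ediv_eq_zero_of_lt (by omega) (by omega)
        rw [hde, hc0, ampsSpec_nil]
        simp

-- B-side invariant: left — mid-segment state (cnt = K+1-r elements consumed, r ≥ 1 of the
-- segment still to fill, mn/mx the running min/max); right — at a segment boundary the
-- loop appends exactly the chunk amplitudes, whatever mn₀/mx₀ hold.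
theorem streamLoop_inv (K : Nat) : ∀ (xs : List Int) (acc : List Int),
    (∀ (r : Nat) (mn mx : Int), 1 ≤ r → r ≤ K →
      streamLoop ((K : Int) + 1) xs ((K : Int) + 1 - (r : Int)) mn mx acc
        = acc ++ ((xs.take r).foldl max mx - (xs.take r).foldl min mn) :: ampsSpec K (xs.drop r)) ∧
    (∀ (mn₀ mx₀ : Int), streamLoop ((K : Int) + 1) xs 0 mn₀ mx₀ acc = acc ++ ampsSpec K xs) := by
  intro xs
  induction xs with
  | nil =>
    intro acc
    constructor
    · intro r mn mx h1 h2
      simp only [streamLoop]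
      rw [if_pos (by omega)]
      simp [ampsSpec_nil]
    · intro mn₀ mx₀
      simp only [streamLoop]
      rw [if_neg (by omega)]
      simp [ampsSpec_nil]
  | cons x ys ih =>
    intro acc
    constructor
    · -- mid-segment step
      intro r mn mx h1 h2
      simp only [streamLoop]
      have hc0 : ¬((K : Int) + 1 - (r : Int) = 0) := by omega
      rw [if_neg hc0, if_neg hc0]
      have hmx : (if x > mx then x else mx) = max mx x := by split <;> omega
      have hmn : (if x < mn then x else mn) = min mn x := by split <;> omega
      by_cases hr : r = 1
      · subst hr
        rw [if_pos (show (K : Int) + 1 - ((1 : Nat) : Int) + 1 = (K : Int) + 1 by push_cast; ring)]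
        rw [(ih (acc ++ [(if x > mx then x else mx) - (if x < mn then x else mn)])).2]
        simp [hmx, hmn]
      · obtain ⟨r', rfl⟩ := Nat.exists_eq_succ_of_ne_zero (show r ≠ 0 by omega)
        rw [if_neg (show ¬((K : Int) + 1 - ((r' + 1 : Nat) : Int) + 1 = (K : Int) + 1) by
          push_cast; omega)]
        have e : (K : Int) + 1 - ((r' + 1 : Nat) : Int) + 1 = (K : Int) + 1 - (r' : Int) := by
          push_cast; omega
        rw [e, (ih acc).1 r' (if x < mn then x else mn) (if x > mx then x else mx)
          (by omega) (by omega)]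
        rw [List.take_succ_cons, List.drop_succ_cons]
        simp only [List.foldl_cons]
        rw [hmx, hmn]
    · -- start of a fresh segment
      intro mn₀ mx₀
      simp only [streamLoop]
      simp only [if_true]
      by_cases hK : K = 0
      · subst hK
        rw [if_pos (by omega)]
        rw [(ih (acc ++ [x - x])).2, ampsSpec_cons]
        simp
      · rw [if_neg (show ¬((0 : Int) + 1 = (K : Int) + 1) by omega)]
        have e : (0 : Int) + 1 = (K : Int) + 1 - (K : Int) := by ring
        rw [e, (ih acc).1 K x x (by omega) (by omega), ampsSpec_cons]

-- ===== VERDICT (by name: the statement is the Claim_ definition above) =====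
theorem array_amplitudes_spec : Claim_equal_array_amplitudes := by
  intro array k _hDom hPre
  unfold Spec_array_amplitudes array_amplitudes_alt
  by_cases hk : k ≤ 0
  · rw [if_pos hk]
    unfold array_amplitudes
    rw [pyRange_neg_nil 0 (array.length : Int) k
      (by unfold Pre_array_amplitudes at hPre; omega) (by omega)]
    rfl
  · rw [if_neg hk]
    have hK : k = ((k.toNat - 1 : Nat) : Int) + 1 := by omega
    rw [hK, a_eq_ampsSpec, (streamLoop_inv (k.toNat - 1) array []).2 0 0, List.nil_append]
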